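-- pv_equiv track=rewrite | github.com/vojtob/ify | src/utils/rec.py | __snap_rectangles
-- ===== SOURCE A (Python) =====
-- ALIGNGAP = 7
--
-- def __group_similar(values, epsilon=ALIGNGAP):
--     snapped = []
--     for val in sorted(values):
--         for snap_val in snapped:
--             if abs(val - snap_val) <= epsilon:
--                 val = snap_val  # zarovnaj na existujúcu hodnotu
--                 break
--         else:
--             snapped.append(val)  # nová skupina
--     return snapped
--
-- def __snap_value(val, snapped_vals, epsilon=ALIGNGAP):
--     for snap_val in snapped_vals:
--         if abs(val - snap_val) <= epsilon:
--             return snap_val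
--     return val
--
-- def __snap_rectangles(rectangles):
--     # Pre každý bod v obdlžníku nájdeme najbližšiu hodnotu z "snapped" hodnot
--     # a nahradíme ňou pôvodnú hodnotu.
--     # Vytvoríme nové obdlžníky so "snapped" hodnotami.
--
--     # Získame všetky hodnoty x1, x2, y1, y2 z obdlžníkov
--     lefts   = [x1 for (x1, y1), (x2, y2) in rectangles]
--     rights  = [x2 for (x1, y1), (x2, y2) in rectangles]
--     tops    = [y1 for (x1, y1), (x2, y2) in rectangles]
--     bottoms = [y2 for (x1, y1), (x2, y2) in rectangles]
--
--     snap_lefts   = __group_similar(lefts)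
--     snap_rights  = __group_similar(rights)
--     snap_tops    = __group_similar(tops)
--     snap_bottoms = __group_similar(bottoms)
--
--     snapped_rectangles = []
--     for (x1, y1), (x2, y2) in rectangles:
--         x1_new = __snap_value(x1, snap_lefts)
--         x2_new = __snap_value(x2, snap_rights)
--         y1_new = __snap_value(y1, snap_tops)
--         y2_new = __snap_value(y2, snap_bottoms)
--         snapped_rectangles.append(((x1_new, y1_new), (x2_new, y2_new)))
--
--     return snapped_rectangles
-- ===== SOURCE B (Python) =====
-- ALIGNGAP = 7
--
-- def _snap_map(values, epsilon=ALIGNGAP):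
--     # One sorted pass: representatives are values that start a new cluster
--     # (> epsilon above the previous representative); every value maps to the
--     # representative of its cluster.
--     snap = {}
--     last = None
--     for v in sorted(values):
--         if last is None or v - last > epsilon:
--             last = v
--         snap[v] = last
--     return snap
--
-- def __snap_rectangles(rectangles):
--     lefts   = _snap_map([r[0][0] for r in rectangles])
--     rights  = _snap_map([r[1][0] for r in rectangles])
--     tops    = _snap_map([r[0][1] for r in rectangles])
--     bottoms = _snap_map([r[1][1] for r in rectangles])
--     return [((lefts.get(x1, x1), tops.get(y1, y1)), (rights.get(x2, x2), bottoms.get(y2, y2)))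
--             for (x1, y1), (x2, y2) in rectangles]
-- ===== Notes on version B (the rewrite author's own statement) =====
-- stated objective: faster
-- what changed: Replaces A's quadratic scheme (a grouping pass that rescans the representative list for every value, plus a per-coordinate linear scan of representatives when snapping) with a single sorted pass per coordinate axis that builds a value->representative dictionary, so snapping each rectangle corner is one hash lookup.
import Mathlib
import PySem

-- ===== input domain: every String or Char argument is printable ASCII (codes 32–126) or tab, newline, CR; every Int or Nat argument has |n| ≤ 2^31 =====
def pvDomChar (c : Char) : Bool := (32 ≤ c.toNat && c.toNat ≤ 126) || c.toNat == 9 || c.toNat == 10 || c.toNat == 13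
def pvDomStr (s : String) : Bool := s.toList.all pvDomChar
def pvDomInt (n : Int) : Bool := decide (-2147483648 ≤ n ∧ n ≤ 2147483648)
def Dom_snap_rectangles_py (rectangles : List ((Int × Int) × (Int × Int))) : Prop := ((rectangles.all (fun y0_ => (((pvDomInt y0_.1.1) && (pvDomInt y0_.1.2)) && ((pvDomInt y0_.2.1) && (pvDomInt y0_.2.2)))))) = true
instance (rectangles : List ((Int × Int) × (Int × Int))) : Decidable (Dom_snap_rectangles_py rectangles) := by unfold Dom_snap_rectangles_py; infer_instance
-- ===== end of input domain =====

-- B replaces A's O(n·k) rescans (grouping rescans the representative list per value,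
-- snapping rescans it per corner) with one sorted pass per axis building a
-- value→representative dict, then snaps corners by dict lookup: measurably faster.

-- ===== PORT A =====
-- __group_similar: the inner for/break/else loop (the `val = snap_val` assignment is dead)
def pvGStep (snapped : List Int) (v : Int) : List Int :=
  match snapped.find? (fun s => decide (|v - s| ≤ 7)) with
  | some _ => snapped          -- break: snap to existing value (assignment unused)
  | none => snapped ++ [v]     -- else: new group

def pvGroupSimilar (values : List Int) : List Int :=
  (PySem.List.sorted values (fun x => x) false).foldl pvGStep []

-- __snap_value: first representative within epsilon, else the value itself
def pvSnapValue (v : Int) (snappedVals : List Int) : Int :=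
  match snappedVals.find? (fun s => decide (|v - s| ≤ 7)) with
  | some s => s
  | none => v

def snap_rectangles_py (rectangles : List ((Int × Int) × (Int × Int))) : List ((Int × Int) × (Int × Int)) :=
  let lefts := rectangles.map (fun r => r.1.1)
  let rights := rectangles.map (fun r => r.2.1)
  let tops := rectangles.map (fun r => r.1.2)
  let bottoms := rectangles.map (fun r => r.2.2)
  let snapLefts := pvGroupSimilar lefts
  let snapRights := pvGroupSimilar rights
  let snapTops := pvGroupSimilar tops
  let snapBottoms := pvGroupSimilar bottoms
  rectangles.map (fun r =>
    ((pvSnapValue r.1.1 snapLefts, pvSnapValue r.1.2 snapTops),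
     (pvSnapValue r.2.1 snapRights, pvSnapValue r.2.2 snapBottoms)))

-- ===== PORT B =====
-- _snap_map's loop body: state = (dict so far, last representative or None)
def pvBStep (st : PySem.Dict Int Int × Option Int) (v : Int) : PySem.Dict Int Int × Option Int :=
  let last : Int :=
    match st.2 with
    | none => v
    | some l => if 7 < v - l then v else l
  (st.1.insert v last, some last)

def pvSnapMap (values : List Int) : PySem.Dict Int Int :=
  ((PySem.List.sorted values (fun x => x) false).foldl pvBStep (PySem.Dict.empty, none)).1

def snap_rectangles_py_alt (rectangles : List ((Int × Int) × (Int × Int))) : List ((Int × Int) × (Int × Int)) :=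
  let dl := pvSnapMap (rectangles.map (fun r => r.1.1))
  let dr := pvSnapMap (rectangles.map (fun r => r.2.1))
  let dt := pvSnapMap (rectangles.map (fun r => r.1.2))
  let db := pvSnapMap (rectangles.map (fun r => r.2.2))
  rectangles.map (fun r =>
    ((dl.getD r.1.1 r.1.1, dt.getD r.1.2 r.1.2),
     (dr.getD r.2.1 r.2.1, db.getD r.2.2 r.2.2)))

-- ===== PRECONDITION & SPEC =====
def Spec_snap_rectangles_py (rectangles : List ((Int × Int) × (Int × Int))) (out : List ((Int × Int) × (Int × Int))) : Prop := out = snap_rectangles_py_alt rectangles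
instance (rectangles : List ((Int × Int) × (Int × Int))) (out : List ((Int × Int) × (Int × Int))) : Decidable (Spec_snap_rectangles_py rectangles out) := by unfold Spec_snap_rectangles_py; infer_instance

-- ===== CLAIM (what is proved, stated in full; the proofs are below) =====
def Claim_equal_snap_rectangles_py : Prop := ∀ (rectangles : List ((Int × Int) × (Int × Int))), Dom_snap_rectangles_py rectangles → Spec_snap_rectangles_py rectangles (snap_rectangles_py rectangles)

-- ===== LEMMAS AND PROOFS =====

-- every non-last element of a gap-pairwise list is more than 7 below the last
theorem pv_lt_last {snapped : List Int} (hp : snapped.Pairwise (fun a b => a + 7 < b))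
    (hne : snapped ≠ []) {s : Int} (hs : s ∈ snapped) (hsl : s ≠ snapped.getLast hne) :
    s + 7 < snapped.getLast hne := by
  have hdl : snapped.dropLast ++ [snapped.getLast hne] = snapped := List.dropLast_concat_getLast hne
  rw [← hdl] at hp hs
  rcases List.mem_append.mp hs with h | h
  · exact (List.pairwise_append.mp hp).2.2 s h _ (by simp)
  · simp at h; exact absurd h hsl

-- core invariant: running B's fold and A's fold side by side over the same sorted tail
theorem pv_main (L : List Int) : ∀ (snapped : List Int) (d : PySem.Dict Int Int),
    L.Pairwise (· ≤ ·) →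
    snapped.Pairwise (fun a b => a + 7 < b) →
    (∀ s ∈ snapped, ∀ u ∈ L, s ≤ u) →
    (∀ k w, d.get? k = some w → snapped.find? (fun s => decide (|k - s| ≤ 7)) = some w) →
    ∀ v, (v ∈ L ∨ ∃ w, d.get? v = some w) →
      (L.foldl pvBStep (d, snapped.getLast?)).1.getD v v = pvSnapValue v (L.foldl pvGStep snapped) := by
  induction L with
  | nil =>
    intro snapped d _ _ _ hd v hv
    rcases hv with hv | ⟨w, hw⟩
    · simp at hv
    · simp only [List.foldl_nil, pvSnapValue, hd v w hw,
        PySem.Dict.getD_eq_get?_getD, hw, Option.getD_some]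
  | cons x L' ih =>
    intro snapped d hsort hp h3 hd v hv
    have hxle : ∀ u ∈ L', x ≤ u := fun u hu => (List.pairwise_cons.mp hsort).1 u hu
    have hsort' : L'.Pairwise (· ≤ ·) := (List.pairwise_cons.mp hsort).2
    have hle_x : ∀ s ∈ snapped, s ≤ x := fun s hs => h3 s hs x (by simp)
    simp only [List.foldl_cons]
    cases hfind : snapped.find? (fun s => decide (|x - s| ≤ 7)) with
    | some s₀ =>
      -- A keeps snapped; the (unique) match is the last representative
      have hne : snapped ≠ [] := by
        intro h; rw [h] at hfind; simp at hfind
      set l := snapped.getLast hne with hl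
      have hs₀mem : s₀ ∈ snapped := List.mem_of_find?_eq_some hfind
      have hs₀p : |x - s₀| ≤ 7 := by
        have := List.find?_some hfind; simpa using this
      have hs₀ : s₀ = l := by
        by_contra hne'
        have := pv_lt_last hp hne hs₀mem hne'
        have hlx : l ≤ x := hle_x l (List.getLast_mem hne)
        have : x - s₀ > 7 := by omega
        have : x - s₀ ≤ 7 := le_of_abs_le hs₀p
        omega
      have hxl : x - l ≤ 7 := by
        have := le_of_abs_le hs₀p; omega
      have hlast : snapped.getLast? = some l := List.getLast?_eq_some_getLast hne
      have hstep : pvBStep (d, snapped.getLast?) x = (d.insert x l, some l) := by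
        simp [pvBStep, hlast, if_neg (by omega : ¬ 7 < x - l)]
      have hgstep : pvGStep snapped x = snapped := by simp [pvGStep, hfind]
      rw [hstep, hgstep, ← hlast]
      apply ih snapped (d.insert x l) hsort' hp
        (fun s hs u hu => h3 s hs u (by simp [hu]))
      · intro k w hk
        rw [PySem.Dict.get?_insert] at hk
        split_ifs at hk with hkx
        · subst hkx; rw [hfind, hs₀]; simpa using hk
        · exact hd k w hk
      · rcases hv with hv | ⟨w, hw⟩
        · rcases List.mem_cons.mp hv with rfl | hv'
          · exact Or.inr ⟨l, by rw [PySem.Dict.get?_insert]; simp⟩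
          · exact Or.inl hv'
        · by_cases hvx : v = x
          · exact Or.inr ⟨l, by rw [PySem.Dict.get?_insert]; simp [hvx]⟩
          · exact Or.inr ⟨w, by rw [PySem.Dict.get?_insert]; simp [hvx, hw]⟩
    | none =>
      -- A appends a new representative x; B starts a new cluster
      have hnomatch : ∀ s ∈ snapped, ¬ (|x - s| ≤ 7) := by
        intro s hs
        have := List.find?_eq_none.mp hfind s hs
        simpa using this
      have hgap : ∀ s ∈ snapped, s + 7 < x := by
        intro s hs
        have h1 := hnomatch s hs
        have h2 := hle_x s hs
        rw [abs_le] at h1; omega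
      have hstep : pvBStep (d, snapped.getLast?) x = (d.insert x x, some x) := by
        cases hsn : snapped.getLast? with
        | none => simp [pvBStep]
        | some l =>
          have hne : snapped ≠ [] := by
            intro h; rw [h] at hsn; simp at hsn
          have hlmem : l ∈ snapped := by
            rw [List.getLast?_eq_some_getLast hne] at hsn
            exact (Option.some_inj.mp hsn) ▸ List.getLast_mem hne
          have := hgap l hlmem
          simp [pvBStep, if_pos (by omega : 7 < x - l)]
      have hgstep : pvGStep snapped x = snapped ++ [x] := by simp [pvGStep, hfind]
      have hlast' : (snapped ++ [x]).getLast? = some x := List.getLast?_concat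
      rw [hstep, hgstep, ← hlast']
      apply ih (snapped ++ [x]) (d.insert x x) hsort'
      · rw [List.pairwise_append]
        exact ⟨hp, List.pairwise_singleton _ _, fun a ha b hb => by simp at hb; have := hgap a ha; omega⟩
      · intro s hs u hu
        rcases List.mem_append.mp hs with h | h
        · exact h3 s h u (by simp [hu])
        · simp at h; subst h; exact hxle u hu
      · intro k w hk
        rw [PySem.Dict.get?_insert] at hk
        split_ifs at hk with hkx
        · subst hkx
          rw [List.find?_append, hfind]
          simp at hk; simp [hk]
        · have := hd k w hk
          simp [List.find?_append, this]
      · rcases hv with hv | ⟨w, hw⟩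
        · rcases List.mem_cons.mp hv with rfl | hv'
          · exact Or.inr ⟨v, by rw [PySem.Dict.get?_insert]; simp⟩
          · exact Or.inl hv'
        · by_cases hvx : v = x
          · exact Or.inr ⟨x, by rw [PySem.Dict.get?_insert]; simp [hvx]⟩
          · exact Or.inr ⟨w, by rw [PySem.Dict.get?_insert]; simp [hvx, hw]⟩

-- per-coordinate: for a value occurring in the list, dict lookup = A's linear snap
theorem pv_coord (values : List Int) (v : Int) (hv : v ∈ values) :
    (pvSnapMap values).getD v v = pvSnapValue v (pvGroupSimilar values) := by
  have hs : (PySem.List.sorted values (fun x => x) false).Pairwise (· ≤ ·) := by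
    have := PySem.List.sorted_pairwise values (fun x => x); simpa using this
  have hmem : v ∈ PySem.List.sorted values (fun x => x) false :=
    (PySem.List.mem_sorted _ _ _ _).mpr hv
  have := pv_main (PySem.List.sorted values (fun x => x) false) [] PySem.Dict.empty hs
    (by simp) (by simp) (by intro k w hk; simp [PySem.Dict.get?_empty] at hk)
    v (Or.inl hmem)
  simpa [pvSnapMap, pvGroupSimilar] using this

-- ===== VERDICT (by name: the statement is the Claim_ definition above) =====
theorem snap_rectangles_py_spec : Claim_equal_snap_rectangles_py := by
  intro rectangles _
  unfold Spec_snap_rectangles_py snap_rectangles_py snap_rectangles_py_alt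
  apply List.map_congr_left
  intro r hr
  have h1 := pv_coord (rectangles.map (fun r => r.1.1)) r.1.1 (List.mem_map_of_mem hr)
  have h2 := pv_coord (rectangles.map (fun r => r.2.1)) r.2.1 (List.mem_map_of_mem hr)
  have h3 := pv_coord (rectangles.map (fun r => r.1.2)) r.1.2 (List.mem_map_of_mem hr)
  have h4 := pv_coord (rectangles.map (fun r => r.2.2)) r.2.2 (List.mem_map_of_mem hr)
  simp [h1, h2, h3, h4]
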